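-- pv_equiv track=rewrite | github.com/gorozooo/my_stock_portfolio | aiapp/views/behavior.py | _streak_from_labels
-- ===== SOURCE A (Python) =====
-- from typing import Any, Dict, List, Optional, Tuple
--
-- def _streak_from_labels(wl_labels: List[str]) -> Tuple[str, int]:
--     """
--     wl_labels は古→新 の win/lose/flat 配列。
--     戻り: (streak_label, streak_len)
--     """
--     if not wl_labels:
--         return ("none", 0)
--     last = wl_labels[-1]
--     n = 1
--     for i in range(len(wl_labels) - 2, -1, -1):
--         if wl_labels[i] == last:
--             n += 1
--         else:
--             break
--     return (last, n)
-- ===== SOURCE B (Python) =====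
-- from itertools import groupby
--
-- def _streak_from_labels(wl_labels):
--     """Forward run-length decomposition via groupby; read off the final run."""
--     runs = [(k, sum(1 for _ in g)) for k, g in groupby(wl_labels)]
--     if not runs:
--         return ("none", 0)
--     return runs[-1]
-- ===== Notes on version B (the rewrite author's own statement) =====
-- stated objective: idiomatic
-- what changed: Replaces the backward index loop with early break by a forward run-length decomposition (itertools.groupby) that returns the last run.
import Mathlib
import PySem

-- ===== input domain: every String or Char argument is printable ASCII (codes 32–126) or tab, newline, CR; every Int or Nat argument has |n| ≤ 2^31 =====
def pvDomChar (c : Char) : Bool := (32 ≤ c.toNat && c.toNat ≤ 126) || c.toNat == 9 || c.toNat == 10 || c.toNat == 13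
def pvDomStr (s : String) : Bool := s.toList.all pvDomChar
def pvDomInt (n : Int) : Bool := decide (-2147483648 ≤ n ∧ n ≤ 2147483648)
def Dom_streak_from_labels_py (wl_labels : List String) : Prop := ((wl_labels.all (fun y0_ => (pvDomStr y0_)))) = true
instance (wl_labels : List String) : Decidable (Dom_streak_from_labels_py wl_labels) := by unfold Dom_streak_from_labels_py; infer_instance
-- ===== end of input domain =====

-- B replaces A's backward index loop (with early break) by a forward run-length
-- decomposition (groupby) whose last run is the answer; objective: idiomatic.

-- ===== PORT A =====
-- the `for i in range(len-2, -1, -1): … else: break` loop, stop = break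
def pvALoop (wl : List String) (last : String) : List Int → Int → Int
  | [], n => n
  | i :: rest, n =>
    if PySem.List.pyGetD wl i "" = last then pvALoop wl last rest (n + 1) else n

def streak_from_labels_py (wl_labels : List String) : String × Int :=
  if wl_labels = [] then ("none", 0)
  else
    let last := PySem.List.pyGetD wl_labels (-1) ""
    let n := pvALoop wl_labels last
      (PySem.List.pyRange ((wl_labels.length : Int) - 2) (-1) (-1)) 1
    (last, n)

-- ===== PORT B =====
-- groupby run-length encoding: pvGrp k c xs = runs of (k repeated c times ++ xs)
def pvGrp (k : String) (c : Int) : List String → List (String × Int)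
  | [] => [(k, c)]
  | x :: xs => if x = k then pvGrp k (c + 1) xs else (k, c) :: pvGrp x 1 xs

def streak_from_labels_py_alt (wl_labels : List String) : String × Int :=
  let runs : List (String × Int) :=
    match wl_labels with
    | [] => []
    | x :: xs => pvGrp x 1 xs
  match runs.getLast? with
  | none => ("none", 0)
  | some p => p

-- ===== PRECONDITION & SPEC =====
def Spec_streak_from_labels_py (wl_labels : List String) (out : String × Int) : Prop := out = streak_from_labels_py_alt wl_labels
instance (wl_labels : List String) (out : String × Int) : Decidable (Spec_streak_from_labels_py wl_labels out) := by unfold Spec_streak_from_labels_py; infer_instance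

-- ===== CLAIM (what is proved, stated in full; the proofs are below) =====
def Claim_equal_streak_from_labels_py : Prop := ∀ (wl_labels : List String), Dom_streak_from_labels_py wl_labels → Spec_streak_from_labels_py wl_labels (streak_from_labels_py wl_labels)

-- ===== LEMMAS AND PROOFS =====

-- count of the prefix of l equal to k (the trailing streak, seen on the reverse)
def pvCp (k : String) : List String → Int
  | [] => 0
  | x :: xs => if x = k then 1 + pvCp k xs else 0

-- tail-recursive "last run" function, the common characterisation of both ports
def pvF (k : String) (c : Int) : List String → String × Int
  | [] => (k, c)
  | x :: xs => if x = k then pvF k (c + 1) xs else pvF x 1 xs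

lemma pvCp_append_singleton (k x : String) (l : List String) :
    pvCp k (l ++ [x]) = pvCp k l + (if (∀ y ∈ l, y = k) ∧ x = k then 1 else 0) := by
  induction l with
  | nil => simp [pvCp]
  | cons a l ih =>
    by_cases ha : a = k
    · have hiff : ((∀ y ∈ a :: l, y = k) ∧ x = k) ↔ ((∀ y ∈ l, y = k) ∧ x = k) := by
        constructor
        · rintro ⟨h1, h2⟩; exact ⟨fun y hy => h1 y (by simp [hy]), h2⟩
        · rintro ⟨h1, h2⟩
          refine ⟨fun y hy => ?_, h2⟩
          rcases List.mem_cons.mp hy with hy | hy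
          · exact hy ▸ ha
          · exact h1 y hy
      rw [List.cons_append, pvCp, pvCp, if_pos ha, if_pos ha, ih, if_congr hiff rfl rfl]
      ring
    · have hno : ¬ ((∀ y ∈ a :: l, y = k) ∧ x = k) := by
        rintro ⟨h1, _⟩; exact ha (h1 a (by simp))
      rw [List.cons_append, pvCp, pvCp, if_neg ha, if_neg ha, if_neg hno]
      ring

lemma pvCp_all (k : String) (l : List String) (h : ∀ y ∈ l, y = k) :
    pvCp k l = l.length := by
  induction l with
  | nil => simp [pvCp]
  | cons a l ih =>
    rw [pvCp, if_pos (h a (by simp)), ih (fun y hy => h y (by simp [hy]))]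
    push_cast [List.length_cons]; ring

lemma pvGetLastD_all (l : List String) (hne : l ≠ []) (x : String)
    (h : ∀ y ∈ l, y = x) : l.getLastD "" = x := by
  rw [List.getLastD_eq_getLast?, List.getLast?_eq_some_getLast (l := l) hne]
  exact h _ (List.getLast_mem hne)

lemma pvAll_of_dropLast_all (l : List String) (hne : l ≠ [])
    (h : ∀ y ∈ l.dropLast, y = l.getLastD "") : ∀ y ∈ l, y = l.getLastD "" := by
  intro y hy
  have hxs : l = l.dropLast ++ [l.getLast hne] := (List.dropLast_append_getLast hne).symm
  have hgl : l.getLastD "" = l.getLast hne := by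
    rw [List.getLastD_eq_getLast?, List.getLast?_eq_some_getLast (l := l) hne]; rfl
  rw [hxs] at hy
  rcases List.mem_append.mp hy with hy' | hy'
  · exact h y hy'
  · simp at hy'; rw [hy', ← hgl]

-- the trailing-run value of a nonempty list, via its reversed dropLast
lemma pvCp_dropLast_no_bonus (l : List String) (hne : l ≠ []) (x : String)
    (hall : ¬ ∀ y ∈ l, y = x) :
    pvCp (l.getLastD "") (l.dropLast.reverse ++ [x])
      = pvCp (l.getLastD "") l.dropLast.reverse := by
  rw [pvCp_append_singleton]
  have hno : ¬ ((∀ y ∈ l.dropLast.reverse, y = l.getLastD "") ∧ x = l.getLastD "") := by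
    rintro ⟨h1, h2⟩
    apply hall
    intro y hy
    have hall2 : ∀ y ∈ l, y = l.getLastD "" :=
      pvAll_of_dropLast_all l hne (fun y hy => h1 y (List.mem_reverse.mpr hy))
    rw [hall2 y hy, ← h2]
  rw [if_neg hno]; ring

lemma pvF_char (xs : List String) : ∀ (k : String) (c : Int),
    pvF k c xs =
      if ∀ y ∈ xs, y = k then (k, c + xs.length)
      else (xs.getLastD "", 1 + pvCp (xs.getLastD "") xs.dropLast.reverse) := by
  induction xs with
  | nil => intro k c; simp [pvF]
  | cons x xs ih =>
    intro k c
    by_cases hx : x = k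
    · rw [pvF, if_pos hx, ih]
      by_cases hall : ∀ y ∈ xs, y = k
      · have hall2 : ∀ y ∈ x :: xs, y = k := by
          intro y hy
          rcases List.mem_cons.mp hy with hy | hy
          · exact hy ▸ hx
          · exact hall y hy
        rw [if_pos hall, if_pos hall2]
        simp
        ring
      · have hne : xs ≠ [] := by rintro rfl; exact hall (by simp)
        have hall2 : ¬ ∀ y ∈ x :: xs, y = k := by
          rintro h; exact hall (fun y hy => h y (by simp [hy]))
        rw [if_neg hall, if_neg hall2]
        have hlast : (x :: xs).getLastD "" = xs.getLastD "" := by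
          cases xs with
          | nil => exact absurd rfl hne
          | cons b bs => simp [List.getLastD]
        have hdrop : (x :: xs).dropLast = x :: xs.dropLast := List.dropLast_cons_of_ne_nil hne
        have hallx : ¬ ∀ y ∈ xs, y = x := fun h => hall (fun y hy => hx ▸ h y hy)
        rw [hlast, hdrop, List.reverse_cons, pvCp_dropLast_no_bonus xs hne x hallx]
    · rw [pvF, if_neg hx, ih x 1]
      have hall2 : ¬ ∀ y ∈ x :: xs, y = k := by
        rintro h; exact hx (h x (by simp))
      rw [if_neg hall2]
      by_cases hall : ∀ y ∈ xs, y = x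
      · rw [if_pos hall]
        cases xs with
        | nil => simp [pvCp]
        | cons b bs =>
          have hne : (b :: bs) ≠ [] := by simp
          have hlastx : (b :: bs).getLastD "" = x := pvGetLastD_all _ hne x hall
          have hlast : (x :: b :: bs).getLastD "" = (b :: bs).getLastD "" := by
            simp [List.getLastD]
          have hdrop : (x :: b :: bs).dropLast = x :: (b :: bs).dropLast :=
            List.dropLast_cons_of_ne_nil hne
          have halldrop : ∀ y ∈ (b :: bs).dropLast.reverse, y = x := by
            intro y hy
            rw [List.mem_reverse] at hy
            exact hall y (List.mem_of_mem_dropLast hy)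
          have hpos : (∀ y ∈ (b :: bs).dropLast.reverse, y = x) ∧ x = x := ⟨halldrop, rfl⟩
          rw [hlast, hlastx, hdrop, List.reverse_cons, pvCp_append_singleton, if_pos hpos,
            pvCp_all x _ halldrop]
          have hlen : ((b :: bs).dropLast.reverse.length : Int) = (bs.length : Int) := by simp
          rw [hlen]
          simp
      · have hne : xs ≠ [] := by rintro rfl; exact hall (by simp)
        rw [if_neg hall]
        have hlast : (x :: xs).getLastD "" = xs.getLastD "" := by
          cases xs with
          | nil => exact absurd rfl hne
          | cons b bs => simp [List.getLastD]
        have hdrop : (x :: xs).dropLast = x :: xs.dropLast := List.dropLast_cons_of_ne_nil hne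
        rw [hlast, hdrop, List.reverse_cons, pvCp_dropLast_no_bonus xs hne x hall]

-- B's last run is pvF
lemma pvGrp_getLast? (xs : List String) : ∀ k c,
    (pvGrp k c xs).getLast? = some (pvF k c xs) := by
  induction xs with
  | nil => intro k c; simp [pvGrp, pvF]
  | cons x xs ih =>
    intro k c
    rw [pvGrp, pvF]
    split
    · exact ih _ _
    · rw [List.getLast?_cons, ih]
      simp

-- A's loop counts the matching prefix of the reversed k-prefix of wl
lemma pvALoop_char (wl : List String) (last : String) :
    ∀ (k : ℕ), k ≤ wl.length → ∀ n,
      pvALoop wl last (PySem.List.pyRange ((k : Int) - 1) (-1) (-1)) n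
        = n + pvCp last (wl.take k).reverse := by
  intro k
  induction k with
  | zero => intro _ n; rw [PySem.List.pyRange_neg_one_eq_nil (by norm_num)]; simp [pvALoop, pvCp]
  | succ k ih =>
    intro hk n
    rw [show ((k + 1 : ℕ) : Int) - 1 = (k : Int) by push_cast; ring]
    rw [PySem.List.pyRange_neg_one_cons (by omega)]
    rw [pvALoop]
    have hklt : k < wl.length := by omega
    have hget : PySem.List.pyGetD wl (k : Int) "" = wl[k] := by
      simp [List.getElem?_eq_getElem hklt]
    have htake : (wl.take (k + 1)).reverse = wl[k] :: (wl.take k).reverse := by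
      rw [List.take_succ, List.getElem?_eq_getElem hklt]
      simp
    rw [hget, htake, pvCp]
    by_cases h : wl[k] = last
    · rw [if_pos h, if_pos h, ih (by omega)]; ring
    · rw [if_neg h, if_neg h]; ring

-- the two ports both compute pvF on a nonempty list
lemma ports_eq_pvF (x : String) (xs : List String) :
    streak_from_labels_py (x :: xs) = pvF x 1 xs ∧
    streak_from_labels_py_alt (x :: xs) = pvF x 1 xs := by
  constructor
  · rw [streak_from_labels_py]
    rw [if_neg (by simp : ¬ (x :: xs) = [])]
    have hne : (x :: xs) ≠ [] := by simp
    have hlast : PySem.List.pyGetD (x :: xs) (-1) "" = (x :: xs).getLast hne :=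
      PySem.List.pyGetD_neg_one _ _ hne
    have hlen : ((x :: xs).length : Int) - 2 = (((x :: xs).length - 1 : ℕ) : Int) - 1 := by
      simp; omega
    have hdl : (x :: xs).take ((x :: xs).length - 1) = (x :: xs).dropLast := by
      rw [List.dropLast_eq_take]
    rw [pvF_char]
    by_cases hall : ∀ y ∈ xs, y = x
    · rw [if_pos hall]
      have hallc : ∀ y ∈ (x :: xs), y = x := by
        intro y hy
        rcases List.mem_cons.mp hy with hy | hy
        · exact hy
        · exact hall y hy
      have hlastx : (x :: xs).getLast hne = x := hallc _ (List.getLast_mem hne)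
      have hloop := pvALoop_char (x :: xs) x ((x :: xs).length - 1) (by simp) 1
      simp only [hlen, hlast, hlastx] at hloop ⊢
      rw [hloop, hdl, pvCp_all x _ (by
        intro y hy
        rw [List.mem_reverse] at hy
        exact hallc y (List.mem_of_mem_dropLast hy))]
      have : (((x :: xs).dropLast.reverse.length : ℕ) : Int) = (xs.length : Int) := by simp
      rw [this]
    · have hxne : xs ≠ [] := by rintro rfl; exact hall (by simp)
      rw [if_neg hall]
      have hgl : (x :: xs).getLast hne = xs.getLastD "" := by
        rw [List.getLastD_eq_getLast?, List.getLast?_eq_some_getLast hxne]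
        exact List.getLast_cons hxne
      have hloop := pvALoop_char (x :: xs) (xs.getLastD "") ((x :: xs).length - 1) (by simp) 1
      simp only [hlen, hlast, hgl] at hloop ⊢
      have hdrop : (x :: xs).dropLast = x :: xs.dropLast := List.dropLast_cons_of_ne_nil hxne
      rw [hloop, hdl, hdrop, List.reverse_cons, pvCp_dropLast_no_bonus xs hxne x hall]
  · show (match (pvGrp x 1 xs).getLast? with
        | none => ("none", (0 : Int))
        | some p => p) = pvF x 1 xs
    rw [pvGrp_getLast? xs x 1]

-- ===== VERDICT (by name: the statement is the Claim_ definition above) =====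
theorem streak_from_labels_py_spec : Claim_equal_streak_from_labels_py := by
  intro wl _
  unfold Spec_streak_from_labels_py
  cases wl with
  | nil => rfl
  | cons x xs =>
    have h := ports_eq_pvF x xs
    rw [h.1, h.2]
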